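-- pv_equiv track=rewrite | github.com/AndHell/hardenedCTIDH | scripts/greedy/greedywombats.py | batchkeys_CTIDH
-- ===== SOURCE A (Python) =====
-- def batchkeys_CTIDH(x,y):
--   poly = [1]
--   for i in range(x):
--     newpoly = poly+[0]
--     for j in range(len(poly)):
--       newpoly[j+1] += poly[j]
--     poly = newpoly
--   for i in range(y):
--     newpoly = poly+[0]
--     for j in range(len(poly)):
--       newpoly[j+1] += 2*poly[j]
--     poly = newpoly
--   return poly[x]
-- ===== SOURCE B (Python) =====
-- def batchkeys_CTIDH(x, y):
--     # coefficient of t^x in (1+t)^x * (1+2t)^y, computed as a single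
--     # binomial sum  sum_j C(x,j)*C(y,j)*2^j  with binomials updated on the fly
--     m = min(x, y)
--     total = 0
--     cx = 1   # C(x, j)
--     cy = 1   # C(y, j)
--     p2 = 1   # 2^j
--     for j in range(m + 1):
--         total += cx * cy * p2
--         cx = cx * (x - j) // (j + 1)
--         cy = cy * (y - j) // (j + 1)
--         p2 *= 2
--     return total
-- ===== Notes on version B (the rewrite author's own statement) =====
-- stated objective: faster
-- what changed: Replaces the quadratic polynomial-multiplication loops (building all coefficients of (1+t)^x*(1+2t)^y) by a single linear pass that evaluates the coefficient of t^x directly as the binomial sum sum_j C(x,j)*C(y,j)*2^j, updating C(x,j), C(y,j) and 2^j incrementally.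
-- outside the precondition, e.g. on batchkeys_CTIDH(-1, 2): A returns 4, B returns 0; on batchkeys_CTIDH(3, -1): A returns 1, B returns 0
import Mathlib
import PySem

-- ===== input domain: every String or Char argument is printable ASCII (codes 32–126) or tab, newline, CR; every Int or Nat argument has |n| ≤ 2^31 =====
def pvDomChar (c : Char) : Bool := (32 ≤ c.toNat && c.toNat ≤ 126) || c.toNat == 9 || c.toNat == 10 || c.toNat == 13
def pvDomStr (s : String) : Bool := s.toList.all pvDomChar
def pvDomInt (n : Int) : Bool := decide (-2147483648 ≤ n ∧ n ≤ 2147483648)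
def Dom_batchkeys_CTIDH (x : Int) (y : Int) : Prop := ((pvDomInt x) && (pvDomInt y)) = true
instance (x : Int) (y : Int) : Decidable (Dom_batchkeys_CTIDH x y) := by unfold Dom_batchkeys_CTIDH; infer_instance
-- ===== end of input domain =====

-- B replaces A's quadratic polynomial-multiplication loops by a single linear pass
-- computing the coefficient of t^x directly as the binomial sum Σ_j C(x,j)·C(y,j)·2^j (objective: faster).


-- ===== PORT A =====
-- one pass of A's inner loop: newpoly = poly+[0]; for j in range(len(poly)): newpoly[j+1] += c*poly[j]
def pvStep (c : Int) (poly : List Int) : List Int :=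
  (List.range poly.length).foldl
    (fun np j => np.set (j + 1) (np.getD (j + 1) 0 + c * poly.getD j 0))
    (poly ++ [0])

def batchkeys_CTIDH (x : Int) (y : Int) : Int :=
  let poly1 := (PySem.List.pyRange 0 x 1).foldl (fun poly _ => pvStep 1 poly) [1]
  let poly2 := (PySem.List.pyRange 0 y 1).foldl (fun poly _ => pvStep 2 poly) poly1
  (PySem.List.pyGet? poly2 x).getD 0

-- ===== PORT B =====
-- state (total, cx, cy, p2) = (running sum, C(x,j), C(y,j), 2^j)
def batchkeys_CTIDH_alt (x : Int) (y : Int) : Int :=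
  let m := min x y
  let st := (PySem.List.pyRange 0 (m + 1) 1).foldl
    (fun (st : Int × Int × Int × Int) j =>
      (st.1 + st.2.1 * st.2.2.1 * st.2.2.2,
       PySem.Int.floordiv (st.2.1 * (x - j)) (j + 1),
       PySem.Int.floordiv (st.2.2.1 * (y - j)) (j + 1),
       st.2.2.2 * 2))
    (0, 1, 1, 1)
  st.1

-- ===== PRECONDITION & SPEC =====
-- Pre_ restricts to the natural domain of nonnegative exponents; for negative x or y A's
-- loops are empty and its value comes from Python's negative-index wraparound (or it raises
-- IndexError), which B's direct formula does not reproduce.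
def Pre_batchkeys_CTIDH (x : Int) (y : Int) : Prop := 0 ≤ x ∧ 0 ≤ y
instance (x : Int) (y : Int) : Decidable (Pre_batchkeys_CTIDH x y) := by unfold Pre_batchkeys_CTIDH; infer_instance
def pvWitness_batchkeys_CTIDH : Int × Int := (3, 2)

def Spec_batchkeys_CTIDH (x : Int) (y : Int) (out : Int) : Prop := out = batchkeys_CTIDH_alt x y
instance (x : Int) (y : Int) (out : Int) : Decidable (Spec_batchkeys_CTIDH x y out) := by unfold Spec_batchkeys_CTIDH; infer_instance

-- ===== CLAIM (what is proved, stated in full; the proofs are below) =====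
def Claim_equal_batchkeys_CTIDH : Prop := ∀ (x : Int) (y : Int), Dom_batchkeys_CTIDH x y → Pre_batchkeys_CTIDH x y → Spec_batchkeys_CTIDH x y (batchkeys_CTIDH x y)

-- ===== LEMMAS AND PROOFS =====

-- coefficient of t^k in (1+t)^a * (1+2t)^b
def pvCoeff (a b k : Nat) : Int :=
  ∑ j ∈ Finset.range (k + 1), ((a.choose (k - j) : Int) * (b.choose j : Int) * 2 ^ j)

def pvListOf (a b : Nat) : List Int := (List.range (a + b + 1)).map (fun k => pvCoeff a b k)

lemma pvFold_length (c : Int) (poly : List Int) (n : Nat) (np : List Int) :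
    ((List.range n).foldl
      (fun np j => np.set (j + 1) (np.getD (j + 1) 0 + c * poly.getD j 0)) np).length
    = np.length := by
  induction n generalizing np with
  | zero => simp
  | succ n ih =>
    rw [List.range_succ, List.foldl_append]
    simp only [List.foldl_cons, List.foldl_nil, List.length_set]
    exact ih np

lemma pvFold_getD (c : Int) (poly : List Int) (n : Nat) (hn : n ≤ poly.length)
    (np : List Int) (hlen : np.length = poly.length + 1) (k : Nat) :
    ((List.range n).foldl
      (fun np j => np.set (j + 1) (np.getD (j + 1) 0 + c * poly.getD j 0)) np).getD k 0
    = np.getD k 0 + (if 1 ≤ k ∧ k ≤ n then c * poly.getD (k - 1) 0 else 0) := by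
  induction n with
  | zero =>
    have h0 : ¬ (1 ≤ k ∧ k ≤ 0) := by omega
    rw [List.range_zero, List.foldl_nil, if_neg h0, add_zero]
  | succ n ih =>
    have hn' : n ≤ poly.length := by omega
    rw [List.range_succ, List.foldl_append]
    simp only [List.foldl_cons, List.foldl_nil]
    set q := (List.range n).foldl
      (fun np j => np.set (j + 1) (np.getD (j + 1) 0 + c * poly.getD j 0)) np with hq
    have hqlen : q.length = poly.length + 1 := by rw [hq, pvFold_length, hlen]
    have hidx : n + 1 < q.length := by omega
    by_cases hk : k = n + 1
    · subst hk
      have h1 : (q.set (n + 1) (q.getD (n + 1) 0 + c * poly.getD n 0)).getD (n + 1) 0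
          = q.getD (n + 1) 0 + c * poly.getD n 0 := by
        simp [List.getD, hidx]
      rw [h1, ih hn']
      simp
    · have h1 : (q.set (n + 1) (q.getD (n + 1) 0 + c * poly.getD n 0)).getD k 0
          = q.getD k 0 := by
        simp [List.getD, Ne.symm hk]
      rw [h1, ih hn']
      by_cases h2 : 1 ≤ k ∧ k ≤ n
      · have : 1 ≤ k ∧ k ≤ n + 1 := ⟨h2.1, by omega⟩
        simp [h2, this]
      · have : ¬ (1 ≤ k ∧ k ≤ n + 1) := by omega
        simp [h2, this]

lemma pvStep_length (c : Int) (poly : List Int) : (pvStep c poly).length = poly.length + 1 := by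
  unfold pvStep
  rw [pvFold_length]
  simp

lemma pvStep_getD (c : Int) (poly : List Int) (k : Nat) :
    (pvStep c poly).getD k 0
    = (poly ++ [0]).getD k 0 + (if 1 ≤ k ∧ k ≤ poly.length then c * poly.getD (k - 1) 0 else 0) := by
  unfold pvStep
  rw [pvFold_getD c poly poly.length le_rfl (poly ++ [0]) (by simp) k]

lemma pvCoeff_zero (a b : Nat) : pvCoeff a b 0 = 1 := by simp [pvCoeff]

lemma pvCoeff_eq_zero (a b k : Nat) (h : a + b < k) : pvCoeff a b k = 0 := by
  unfold pvCoeff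
  apply Finset.sum_eq_zero
  intro j hj
  rw [Finset.mem_range] at hj
  by_cases hjb : b < j
  · simp [Nat.choose_eq_zero_of_lt hjb]
  · have : a < k - j := by omega
    simp [Nat.choose_eq_zero_of_lt this]

lemma pvCoeff_succ_left (a b k : Nat) :
    pvCoeff (a + 1) b (k + 1) = pvCoeff a b (k + 1) + pvCoeff a b k := by
  unfold pvCoeff
  rw [Finset.sum_range_succ, Finset.sum_range_succ (f := fun j => ((a.choose (k + 1 - j) : Int) * (b.choose j : Int) * 2 ^ j))]
  have hcongr : ∀ j ∈ Finset.range (k + 1),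
      (((a + 1).choose (k + 1 - j) : Int) * (b.choose j : Int) * 2 ^ j)
      = ((a.choose (k - j) : Int) * (b.choose j : Int) * 2 ^ j)
        + ((a.choose (k + 1 - j) : Int) * (b.choose j : Int) * 2 ^ j) := by
    intro j hj
    rw [Finset.mem_range] at hj
    have h1 : k + 1 - j = (k - j) + 1 := by omega
    rw [h1, Nat.choose_succ_succ]
    push_cast
    ring
  rw [Finset.sum_congr rfl hcongr, Finset.sum_add_distrib]
  have h2 : k + 1 - (k + 1) = 0 := by omega
  rw [h2]
  simp only [Nat.choose_zero_right, Nat.cast_one, one_mul]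
  ring

lemma pvCoeff_succ_right (a b k : Nat) :
    pvCoeff a (b + 1) (k + 1) = pvCoeff a b (k + 1) + 2 * pvCoeff a b k := by
  unfold pvCoeff
  rw [Finset.sum_range_succ', Finset.sum_range_succ' (f := fun j => ((a.choose (k + 1 - j) : Int) * (b.choose j : Int) * 2 ^ j))]
  have hcongr : ∀ j ∈ Finset.range (k + 1),
      ((a.choose (k + 1 - (j + 1)) : Int) * ((b + 1).choose (j + 1) : Int) * 2 ^ (j + 1))
      = ((a.choose (k - j) : Int) * (b.choose (j + 1) : Int) * 2 ^ (j + 1))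
        + 2 * ((a.choose (k - j) : Int) * (b.choose j : Int) * 2 ^ j) := by
    intro j hj
    have h1 : k + 1 - (j + 1) = k - j := by omega
    rw [h1, Nat.choose_succ_succ]
    push_cast
    ring
  rw [Finset.sum_congr rfl hcongr, Finset.sum_add_distrib]
  have hcongr2 : ∀ j ∈ Finset.range (k + 1),
      ((a.choose (k + 1 - (j + 1)) : Int) * (b.choose (j + 1) : Int) * 2 ^ (j + 1))
      = ((a.choose (k - j) : Int) * (b.choose (j + 1) : Int) * 2 ^ (j + 1)) := by
    intro j hj
    have h1 : k + 1 - (j + 1) = k - j := by omega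
    rw [h1]
  rw [Finset.sum_congr rfl hcongr2, Finset.mul_sum]
  have h2 : k + 1 - 0 = k + 1 := by omega
  rw [h2]
  simp only [Nat.choose_zero_right, Nat.cast_one, pow_zero]
  ring

lemma pvListOf_length (a b : Nat) : (pvListOf a b).length = a + b + 1 := by
  simp [pvListOf]

lemma pvListOf_getD (a b k : Nat) :
    (pvListOf a b).getD k 0 = if k < a + b + 1 then pvCoeff a b k else 0 := by
  unfold pvListOf
  by_cases h : k < a + b + 1
  · rw [List.getD_eq_getElem _ _ (by simpa using h)]
    simp [h]
  · rw [List.getD_eq_default _ _ (by simpa using h)]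
    simp [h]

lemma pvStep_listOf_one (a b : Nat) : pvStep 1 (pvListOf a b) = pvListOf (a + 1) b := by
  apply List.ext_getElem
  · rw [pvStep_length, pvListOf_length, pvListOf_length]; omega
  intro k h1 h2
  have hlen : k < a + b + 2 := by rw [pvStep_length, pvListOf_length] at h1; omega
  have e1 : (pvStep 1 (pvListOf a b))[k] = (pvStep 1 (pvListOf a b)).getD k 0 := (List.getD_eq_getElem _ 0 h1).symm
  have e2 : (pvListOf (a + 1) b)[k] = (pvListOf (a + 1) b).getD k 0 := (List.getD_eq_getElem _ 0 h2).symm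
  rw [e1, e2, pvStep_getD, pvListOf_getD (a + 1) b k]
  have happ : (pvListOf a b ++ [0]).getD k 0 = if k < a + b + 1 then pvCoeff a b k else 0 := by
    by_cases h : k < a + b + 1
    · rw [List.getD_append _ _ _ _ (by rw [pvListOf_length]; omega)]
      rw [pvListOf_getD a b k]
    · have hk : k = a + b + 1 := by omega
      subst hk
      rw [List.getD_eq_getElem _ 0 (by simp [pvListOf_length])]
      simp [List.getElem_append_right, pvListOf_length]
  rw [pvListOf_length]
  match k, hlen with
  | 0, _ =>
    have h0 : ¬ (1 ≤ 0 ∧ 0 ≤ a + b + 1) := by omega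
    rw [if_neg h0, happ, if_pos (show 0 < a + b + 1 by omega),
      if_pos (show 0 < a + 1 + b + 1 by omega), pvCoeff_zero, pvCoeff_zero]
    ring
  | (k' + 1), hlen =>
    have hb : 1 ≤ k' + 1 ∧ k' + 1 ≤ a + b + 1 := ⟨by omega, by omega⟩
    rw [happ, if_pos hb, pvListOf_getD a b (k' + 1 - 1)]
    simp only [Nat.add_sub_cancel]
    rw [if_pos (show k' < a + b + 1 by omega),
      if_pos (show k' + 1 < a + 1 + b + 1 by omega)]
    by_cases h : k' + 1 < a + b + 1
    · rw [if_pos h, pvCoeff_succ_left]; ring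
    · have hk : k' + 1 = a + b + 1 := by omega
      have hk' : k' = a + b := by omega
      rw [if_neg h, hk, hk', pvCoeff_succ_left a b (a + b),
        pvCoeff_eq_zero a b (a + b + 1) (by omega)]
      ring

lemma pvStep_listOf_two (a b : Nat) : pvStep 2 (pvListOf a b) = pvListOf a (b + 1) := by
  apply List.ext_getElem
  · rw [pvStep_length, pvListOf_length, pvListOf_length]; omega
  intro k h1 h2
  have hlen : k < a + b + 2 := by rw [pvStep_length, pvListOf_length] at h1; omega
  have e1 : (pvStep 2 (pvListOf a b))[k] = (pvStep 2 (pvListOf a b)).getD k 0 := (List.getD_eq_getElem _ 0 h1).symm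
  have e2 : (pvListOf a (b + 1))[k] = (pvListOf a (b + 1)).getD k 0 := (List.getD_eq_getElem _ 0 h2).symm
  rw [e1, e2, pvStep_getD, pvListOf_getD a (b + 1) k]
  have happ : (pvListOf a b ++ [0]).getD k 0 = if k < a + b + 1 then pvCoeff a b k else 0 := by
    by_cases h : k < a + b + 1
    · rw [List.getD_append _ _ _ _ (by rw [pvListOf_length]; omega)]
      rw [pvListOf_getD a b k]
    · have hk : k = a + b + 1 := by omega
      subst hk
      rw [List.getD_eq_getElem _ 0 (by simp [pvListOf_length])]
      simp [List.getElem_append_right, pvListOf_length]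
  rw [pvListOf_length]
  match k, hlen with
  | 0, _ =>
    have h0 : ¬ (1 ≤ 0 ∧ 0 ≤ a + b + 1) := by omega
    rw [if_neg h0, happ, if_pos (show 0 < a + b + 1 by omega),
      if_pos (show 0 < a + (b + 1) + 1 by omega), pvCoeff_zero, pvCoeff_zero]
    ring
  | (k' + 1), hlen =>
    have hb : 1 ≤ k' + 1 ∧ k' + 1 ≤ a + b + 1 := ⟨by omega, by omega⟩
    rw [happ, if_pos hb, pvListOf_getD a b (k' + 1 - 1)]
    simp only [Nat.add_sub_cancel]
    rw [if_pos (show k' < a + b + 1 by omega),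
      if_pos (show k' + 1 < a + (b + 1) + 1 by omega)]
    by_cases h : k' + 1 < a + b + 1
    · rw [if_pos h, pvCoeff_succ_right]
    · have hk : k' + 1 = a + b + 1 := by omega
      have hk' : k' = a + b := by omega
      rw [if_neg h, hk, hk', pvCoeff_succ_right a b (a + b),
        pvCoeff_eq_zero a b (a + b + 1) (by omega)]

lemma pvIter_one (a : Nat) : (pvStep 1)^[a] [1] = pvListOf a 0 := by
  induction a with
  | zero => simp [pvListOf, List.range_succ, pvCoeff_zero]
  | succ a ih => rw [Function.iterate_succ_apply', ih, pvStep_listOf_one]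

lemma pvIter_two (a b : Nat) : (pvStep 2)^[b] (pvListOf a 0) = pvListOf a b := by
  induction b with
  | zero => simp
  | succ b ih => rw [Function.iterate_succ_apply', ih, pvStep_listOf_two]

lemma pvA_eq (nx ny : Nat) : batchkeys_CTIDH (nx : Int) (ny : Int) = pvCoeff nx ny nx := by
  simp only [batchkeys_CTIDH, PySem.List.pyRange_zero_natCast, List.foldl_const,
    List.length_map, List.length_range]
  rw [pvIter_one, pvIter_two]
  have h : nx < (pvListOf nx ny).length := by rw [pvListOf_length]; omega
  rw [PySem.List.pyGet?_ofNat _ nx h]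
  simp only [Option.getD_some]
  have := pvListOf_getD nx ny nx
  rw [List.getD_eq_getElem _ 0 h] at this
  rw [this, if_pos (by omega)]

lemma pvB_loop (nx ny : Nat) (N : Nat) (hN : N ≤ min nx ny + 1) :
    ((List.range N).map (Nat.cast : Nat → Int)).foldl
      (fun (st : Int × Int × Int × Int) j =>
        (st.1 + st.2.1 * st.2.2.1 * st.2.2.2,
         PySem.Int.floordiv (st.2.1 * ((nx : Int) - j)) (j + 1),
         PySem.Int.floordiv (st.2.2.1 * ((ny : Int) - j)) (j + 1),
         st.2.2.2 * 2))
      (0, 1, 1, 1)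
    = (∑ j ∈ Finset.range N, ((nx.choose j : Int) * (ny.choose j : Int) * 2 ^ j),
       (nx.choose N : Int), (ny.choose N : Int), (2 ^ N : Int)) := by
  induction N with
  | zero => simp
  | succ N ih =>
    have hN' : N ≤ min nx ny + 1 := by omega
    have hNx : N ≤ nx := by omega
    have hNy : N ≤ ny := by omega
    rw [List.range_succ, List.map_append, List.foldl_append, ih hN']
    simp only [List.map_cons, List.map_nil, List.foldl_cons, List.foldl_nil]
    have hx : (nx.choose N : Int) * ((nx : Int) - (N : Int)) = ((nx.choose N * (nx - N) : Nat) : Int) := by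
      push_cast [Nat.cast_sub hNx]; ring
    have hy : (ny.choose N : Int) * ((ny : Int) - (N : Int)) = ((ny.choose N * (ny - N) : Nat) : Int) := by
      push_cast [Nat.cast_sub hNy]; ring
    have hcx : PySem.Int.floordiv ((nx.choose N : Int) * ((nx : Int) - (N : Int))) ((N : Int) + 1)
        = (nx.choose (N + 1) : Int) := by
      rw [hx]
      have : ((N : Int) + 1) = ((N + 1 : Nat) : Int) := by push_cast; ring
      rw [this, PySem.Int.floordiv_natCast]
      congr 1
      rw [← Nat.choose_succ_right_eq, Nat.mul_div_cancel _ (by omega)]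
    have hcy : PySem.Int.floordiv ((ny.choose N : Int) * ((ny : Int) - (N : Int))) ((N : Int) + 1)
        = (ny.choose (N + 1) : Int) := by
      rw [hy]
      have : ((N : Int) + 1) = ((N + 1 : Nat) : Int) := by push_cast; ring
      rw [this, PySem.Int.floordiv_natCast]
      congr 1
      rw [← Nat.choose_succ_right_eq, Nat.mul_div_cancel _ (by omega)]
    rw [Finset.sum_range_succ]
    simp only [hcx, hcy, Prod.mk.injEq]
    and_intros <;> trivial

lemma pvB_eq (nx ny : Nat) :
    batchkeys_CTIDH_alt (nx : Int) (ny : Int)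
    = ∑ j ∈ Finset.range (min nx ny + 1), ((nx.choose j : Int) * (ny.choose j : Int) * 2 ^ j) := by
  have hmin : min (nx : Int) (ny : Int) + 1 = ((min nx ny + 1 : Nat) : Int) := by
    push_cast [Nat.cast_min]; ring
  simp only [batchkeys_CTIDH_alt, hmin, PySem.List.pyRange_zero_natCast]
  rw [pvB_loop nx ny (min nx ny + 1) le_rfl]

lemma pvBridge (nx ny : Nat) :
    pvCoeff nx ny nx = ∑ j ∈ Finset.range (min nx ny + 1), ((nx.choose j : Int) * (ny.choose j : Int) * 2 ^ j) := by
  unfold pvCoeff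
  have hcongr : ∀ j ∈ Finset.range (nx + 1),
      ((nx.choose (nx - j) : Int) * (ny.choose j : Int) * 2 ^ j)
      = ((nx.choose j : Int) * (ny.choose j : Int) * 2 ^ j) := by
    intro j hj
    rw [Finset.mem_range] at hj
    rw [Nat.choose_symm (show j ≤ nx by omega)]
  rw [Finset.sum_congr rfl hcongr]
  symm
  apply Finset.sum_subset
  · intro t ht
    rw [Finset.mem_range] at ht ⊢
    exact lt_of_lt_of_le ht (Nat.succ_le_succ (min_le_left nx ny))
  · intro j hj hj2
    rw [Finset.mem_range] at hj
    rw [Finset.mem_range, not_lt] at hj2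
    rcases Nat.le_total nx ny with h | h
    · rw [min_eq_left h] at hj2; omega
    · rw [min_eq_right h] at hj2
      have hyj : ny < j := by omega
      simp [Nat.choose_eq_zero_of_lt hyj]

-- ===== VERDICT (by name: the statement is the Claim_ definition above) =====
theorem batchkeys_CTIDH_spec : Claim_equal_batchkeys_CTIDH := by
  intro x y _ hpre
  unfold Spec_batchkeys_CTIDH
  obtain ⟨hx, hy⟩ := hpre
  have ex : x = (x.toNat : Int) := (Int.toNat_of_nonneg hx).symm
  have ey : y = (y.toNat : Int) := (Int.toNat_of_nonneg hy).symm
  rw [ex, ey, pvA_eq, pvB_eq, pvBridge]
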